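-- pv_equiv track=rewrite | github.com/setNewUsername/frankenstein | tools/preprocessor/preprocessor.py | removeSubStr
-- ===== SOURCE A (Python) =====
-- def removeSubStr(line:str, sub:str) -> str:
--     result = ""
--
--     subStrStartIndex = line.find(sub)
--     if subStrStartIndex != -1:
--         subStrEndIndex = subStrStartIndex + len(sub)
--         for i in range(len(line)):
--             if i < subStrStartIndex or i > subStrEndIndex-1:
--                 result += line[i]
--     else:
--         result = line
--
--     return result
-- ===== SOURCE B (Python) =====
-- def removeSubStr(line: str, sub: str) -> str:
--     start = line.find(sub)
--     if start == -1:
--         return line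
--     return line[:start] + line[start + len(sub):]
-- ===== Notes on version B (the rewrite author's own statement) =====
-- stated objective: idiomatic
-- what changed: Replaces the per-index loop that rebuilds the result character by character with a single find followed by two direct slices concatenated.
import Mathlib
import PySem

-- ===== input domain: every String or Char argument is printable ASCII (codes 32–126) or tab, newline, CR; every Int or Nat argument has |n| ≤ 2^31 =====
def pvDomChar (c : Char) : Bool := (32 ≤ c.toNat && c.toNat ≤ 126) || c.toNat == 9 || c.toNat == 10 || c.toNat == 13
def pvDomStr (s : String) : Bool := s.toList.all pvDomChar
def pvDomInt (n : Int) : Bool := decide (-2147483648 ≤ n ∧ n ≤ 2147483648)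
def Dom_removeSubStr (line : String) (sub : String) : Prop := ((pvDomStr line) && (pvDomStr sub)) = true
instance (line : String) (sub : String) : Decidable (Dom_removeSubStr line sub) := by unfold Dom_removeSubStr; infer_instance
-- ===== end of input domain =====

-- B replaces A's per-index rebuild loop with find + two slices (idiomatic); equal on all inputs.


-- ===== PORT A =====
-- literal port of A: find, then for i in range(len(line)) append line[i] unless it lies in the found window
-- (line[i] is always in range since i ∈ range(len(line)); pyGetD's default is never used)
def removeSubStr (line : String) (sub : String) : String :=
  let result : List Char := []
  let subStrStartIndex : Int := PySem.Chars.find line.toList sub.toList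
  if subStrStartIndex ≠ -1 then
    let subStrEndIndex : Int := subStrStartIndex + (sub.toList.length : Int)
    String.ofList ((PySem.List.pyRange 0 (line.toList.length : Int) 1).foldl
      (fun acc i =>
        if i < subStrStartIndex ∨ subStrEndIndex - 1 < i then
          acc ++ [PySem.List.pyGetD line.toList i ' ']
        else acc) result)
  else line

-- ===== PORT B =====
def removeSubStr_alt (line : String) (sub : String) : String :=
  let start : Int := PySem.Chars.find line.toList sub.toList
  if start = -1 then line
  else String.ofList (PySem.List.slice line.toList none (some start) ++
                  PySem.List.slice line.toList (some (start + (sub.toList.length : Int))) none)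

-- ===== PRECONDITION & SPEC =====
def Spec_removeSubStr (line : String) (sub : String) (out : String) : Prop := out = removeSubStr_alt line sub
instance (line : String) (sub : String) (out : String) : Decidable (Spec_removeSubStr line sub out) := by unfold Spec_removeSubStr; infer_instance

-- ===== CLAIM (what is proved, stated in full; the proofs are below) =====
def Claim_equal_removeSubStr : Prop := ∀ (line : String) (sub : String), Dom_removeSubStr line sub → Spec_removeSubStr line sub (removeSubStr line sub)

-- ===== LEMMAS AND PROOFS =====

lemma map_getD_range_take (l : List Char) (k : Nat) (hk : k ≤ l.length) :
    (List.range k).map (fun j => l.getD j ' ') = l.take k := by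
  apply List.ext_getElem
  · simp [Nat.min_eq_left hk]
  · intro i h1 h2
    simp only [List.getElem_map, List.getElem_range, List.getElem_take]
    have h3 : i < l.length := by simp at h2; omega
    simp [List.getD, List.getElem?_eq_getElem h3]

lemma map_getD_range_drop (l : List Char) (d r : Nat) (hr : d + r = l.length) :
    (List.range r).map (fun t => l.getD (d + t) ' ') = l.drop d := by
  apply List.ext_getElem
  · simp; omega
  · intro i h1 h2
    simp only [List.getElem_map, List.getElem_range, List.getElem_drop]
    have h3 : d + i < l.length := by simp at h2; omega
    simp [List.getD, List.getElem?_eq_getElem h3]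

lemma natChunks (l : List Char) (k m : Nat) (hkm : k + m ≤ l.length) :
    ((List.range l.length).filter (fun j => decide (j < k ∨ k + m ≤ j))).map (fun j => l.getD j ' ')
      = l.take k ++ l.drop (k + m) := by
  obtain ⟨r, hr⟩ : ∃ r, l.length = k + (m + r) := ⟨l.length - (k + m), by omega⟩
  rw [show ((List.range l.length) = List.range (k + (m + r))) from by rw [← hr],
      List.range_add, List.range_add]
  simp only [List.map_append, List.map_map, List.filter_append, List.filter_map]
  have c1 : (List.range k).filter (fun j => decide (j < k ∨ k + m ≤ j)) = List.range k := by
    apply List.filter_eq_self.mpr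
    intro a ha
    have := List.mem_range.mp ha
    simp; omega
  have c2 : (List.range m).filter ((fun j => decide (j < k ∨ k + m ≤ j)) ∘ fun x => k + x) = [] := by
    apply List.filter_eq_nil_iff.mpr
    intro a ha
    have := List.mem_range.mp ha
    simp; omega
  have c3 : (List.range r).filter ((fun j => decide (j < k ∨ k + m ≤ j)) ∘ (fun x => k + x) ∘ fun x => m + x) = List.range r := by
    apply List.filter_eq_self.mpr
    intro a _
    simp
  rw [c1, c2, c3]
  simp only [List.map_nil, List.nil_append]
  rw [map_getD_range_take l k (by omega)]
  have e2 : (List.range r).map (fun x => l.getD (k + (m + x)) ' ') = l.drop (k + m) := by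
    rw [← map_getD_range_drop l (k + m) r (by omega)]
    apply List.map_congr_left
    intro a _
    congr 1
    omega
  rw [show ((fun j => l.getD j ' ') ∘ (fun x => k + x) ∘ fun x => m + x) = (fun x => l.getD (k + (m + x)) ' ') from rfl, e2]

lemma loopA (l : List Char) (k m : Nat) (hkm : k + m ≤ l.length) :
    (PySem.List.pyRange 0 (l.length : Int) 1).foldl
      (fun acc i => if i < (k : Int) ∨ (k : Int) + (m : Int) - 1 < i
        then acc ++ [PySem.List.pyGetD l i ' '] else acc) []
    = l.take k ++ l.drop (k + m) := by
  have hf : (fun (acc : List Char) (i : Int) =>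
        if i < (k : Int) ∨ (k : Int) + (m : Int) - 1 < i
        then acc ++ [PySem.List.pyGetD l i ' '] else acc)
      = (fun acc i =>
        if (fun i : Int => decide (i < (k : Int) ∨ (k : Int) + (m : Int) - 1 < i)) i = true
        then acc ++ [(fun i => PySem.List.pyGetD l i ' ') i] else acc) := by
    funext acc i
    simp only [decide_eq_true_eq]
  rw [hf, PySem.List.foldl_append_if, PySem.List.pyRange_one, List.nil_append,
      List.filter_map, List.map_map]
  rw [show ((l.length : Int) - 0).toNat = l.length from by omega]
  have hfil : (List.range l.length).filter
        ((fun i : Int => decide (i < (k : Int) ∨ (k : Int) + (m : Int) - 1 < i)) ∘ fun j : Nat => (0 : Int) + (j : Int))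
      = (List.range l.length).filter (fun j => decide (j < k ∨ k + m ≤ j)) := by
    apply List.filter_congr
    intro a _
    simp only [Function.comp_apply, decide_eq_decide]
    omega
  have hmap : ((fun i => PySem.List.pyGetD l i ' ') ∘ fun j : Nat => (0 : Int) + (j : Int))
      = (fun j : Nat => l.getD j ' ') := by
    funext j
    simp only [Function.comp_apply, zero_add, PySem.List.pyGetD_natCast]
  rw [hfil, hmap, natChunks l k m hkm]

-- ===== VERDICT (by name: the statement is the Claim_ definition above) =====
theorem removeSubStr_spec : Claim_equal_removeSubStr := by
  intro line sub _
  unfold Spec_removeSubStr removeSubStr removeSubStr_alt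
  by_cases h : PySem.Chars.find line.toList sub.toList = -1
  · simp [h]
  · simp only [h, ne_eq, not_false_iff, if_true, if_false]
    have hpos : 0 ≤ PySem.Chars.find line.toList sub.toList := by
      have := PySem.Chars.neg_one_le_find line.toList sub.toList
      omega
    set f := PySem.Chars.find line.toList sub.toList with hfdef
    set k := f.toNat with hkdef
    have hfk : f = (k : Int) := by omega
    have hpre := (PySem.Chars.find_spec (s := line.toList) (sub := sub.toList) hpos).1
    have hm : k + sub.toList.length ≤ line.toList.length := by
      have hlen := hpre.length_le
      rw [List.length_drop] at hlen
      have hkle : f ≤ (line.toList.length : Int) := PySem.Chars.find_le_length line.toList sub.toList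
      omega
    rw [PySem.List.slice_to line.toList hpos,
        PySem.List.slice_from line.toList (a := f + (sub.toList.length : Int)) (by omega)]
    rw [show (f + (sub.toList.length : Int)).toNat = k + sub.toList.length from by omega, hfk]
    congr 1
    exact loopA line.toList k sub.toList.length hm
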